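-- pv_equiv track=rewrite | github.com/garcia-nacho/TOP | TBpipeline/niph_tb_pipeline/niph_tb_pipeline.py | NumberRelated
-- ===== SOURCE A (Python) =====
-- def NumberRelated(sample, dists):
--     related = {"close": 0, "somewhat" : 0}
--     for key in dists:
--         if key == sample:
--             continue
--         if int(dists[key]) <= 12:
--             if int(dists[key]) > 5:
--                 related["somewhat"] += 1
--             else:
--                 related["close"] += 1
--                 related["somewhat"] += 1
--     return related
-- ===== SOURCE B (Python) =====
-- def NumberRelated(sample, dists):
--     return {
--         "close": sum(1 for k in dists if k != sample and int(dists[k]) <= 5),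
--         "somewhat": sum(1 for k in dists if k != sample and int(dists[k]) <= 12),
--     }
-- ===== Notes on version B (the rewrite author's own statement) =====
-- stated objective: simpler
-- what changed: Replaces the single pass with nested branches and shared increments by two independent monotone threshold counts (close = #keys with value <= 5, somewhat = #keys with value <= 12), each a one-line sum over the dict.
import Mathlib
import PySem

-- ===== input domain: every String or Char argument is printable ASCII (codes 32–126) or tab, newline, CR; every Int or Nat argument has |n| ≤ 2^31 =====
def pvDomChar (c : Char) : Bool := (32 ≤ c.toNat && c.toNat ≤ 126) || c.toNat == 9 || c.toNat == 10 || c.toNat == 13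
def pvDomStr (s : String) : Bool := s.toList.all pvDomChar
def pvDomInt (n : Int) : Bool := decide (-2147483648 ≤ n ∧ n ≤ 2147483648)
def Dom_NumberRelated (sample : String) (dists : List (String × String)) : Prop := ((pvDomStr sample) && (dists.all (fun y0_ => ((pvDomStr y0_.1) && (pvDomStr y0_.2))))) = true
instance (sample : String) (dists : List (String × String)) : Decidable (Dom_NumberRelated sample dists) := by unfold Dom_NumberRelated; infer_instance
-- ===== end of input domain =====

-- B replaces A's single fold with nested branches by two independent threshold counts
-- (close = #keys ≤ 5, somewhat = #keys ≤ 12); objective: simpler.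


-- ===== PORT A =====
-- the dict is the association list `dists`; `for key in dists` with `dists[key]`
-- visits each (key, value) item in insertion order (keys are unique, see Pre_).
-- `int(...)` is PySem.Int.ofStr?; the `.getD 0` default is never used inside Pre_
-- (Pre_ guarantees every visited value parses).
def NumberRelated (sample : String) (dists : List (String × String)) : List (String × Int) :=
  let related :=
    dists.foldl (fun (r : Int × Int) kv =>
      if kv.1 = sample then r
      else if (PySem.Int.ofStr? kv.2).getD 0 ≤ 12 then
        if (PySem.Int.ofStr? kv.2).getD 0 > 5 then (r.1, r.2 + 1)
        else (r.1 + 1, r.2 + 1)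
      else r) (0, 0)
  [("close", related.1), ("somewhat", related.2)]

-- ===== PORT B =====
def NumberRelated_alt (sample : String) (dists : List (String × String)) : List (String × Int) :=
  [("close",
      (dists.map (fun kv => if kv.1 ≠ sample ∧ (PySem.Int.ofStr? kv.2).getD 0 ≤ 5 then (1 : Int) else 0)).sum),
   ("somewhat",
      (dists.map (fun kv => if kv.1 ≠ sample ∧ (PySem.Int.ofStr? kv.2).getD 0 ≤ 12 then (1 : Int) else 0)).sum)]

-- ===== PRECONDITION & SPEC =====
-- Pre_ excludes (a) values (at keys other than sample) that int() rejects — A raises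
-- ValueError there — and (b) duplicate keys, on which the assoc-list/dict
-- correspondence is ambiguous (a Python dict collapses them before A ever runs).
def Pre_NumberRelated (sample : String) (dists : List (String × String)) : Prop :=
  (dists.map Prod.fst).Nodup ∧
  ∀ kv ∈ dists, kv.1 ≠ sample → (PySem.Int.ofStr? kv.2).isSome
instance (sample : String) (dists : List (String × String)) : Decidable (Pre_NumberRelated sample dists) := by unfold Pre_NumberRelated; infer_instance
def pvWitness_NumberRelated : String × (List (String × String)) :=
  ("s", [("a", "3"), ("b", " +10 "), ("s", "zz"), ("c", "14")])
def Spec_NumberRelated (sample : String) (dists : List (String × String)) (out : List (String × Int)) : Prop := out = NumberRelated_alt sample dists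
instance (sample : String) (dists : List (String × String)) (out : List (String × Int)) : Decidable (Spec_NumberRelated sample dists out) := by unfold Spec_NumberRelated; infer_instance

-- ===== CLAIM (what is proved, stated in full; the proofs are below) =====
def Claim_equal_NumberRelated : Prop := ∀ (sample : String) (dists : List (String × String)), Dom_NumberRelated sample dists → Pre_NumberRelated sample dists → Spec_NumberRelated sample dists (NumberRelated sample dists)

-- ===== LEMMAS AND PROOFS =====

-- A's fold adds the two 0/1 indicator sums to its accumulator.
theorem NumberRelated_loop (sample : String) (dists : List (String × String)) (c s : Int) :
    dists.foldl (fun (r : Int × Int) kv =>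
      if kv.1 = sample then r
      else if (PySem.Int.ofStr? kv.2).getD 0 ≤ 12 then
        if (PySem.Int.ofStr? kv.2).getD 0 > 5 then (r.1, r.2 + 1)
        else (r.1 + 1, r.2 + 1)
      else r) (c, s)
    = (c + (dists.map (fun kv => if kv.1 ≠ sample ∧ (PySem.Int.ofStr? kv.2).getD 0 ≤ 5 then (1 : Int) else 0)).sum,
       s + (dists.map (fun kv => if kv.1 ≠ sample ∧ (PySem.Int.ofStr? kv.2).getD 0 ≤ 12 then (1 : Int) else 0)).sum) := by
  induction dists generalizing c s with
  | nil => simp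
  | cons kv rest ih =>
    simp only [List.foldl_cons, List.map_cons, List.sum_cons]
    by_cases h1 : kv.1 = sample
    · simp [h1, ih]
    · by_cases h12 : (PySem.Int.ofStr? kv.2).getD 0 ≤ 12
      · by_cases h5 : (PySem.Int.ofStr? kv.2).getD 0 > 5
        · have hn5 : ¬ (kv.1 ≠ sample ∧ (PySem.Int.ofStr? kv.2).getD 0 ≤ 5) := by
            rintro ⟨-, h⟩; omega
          simp only [if_neg h1, if_pos h12, if_pos h5, ih, if_neg hn5,
            if_pos (And.intro h1 h12), Prod.mk.injEq]
          constructor <;> ring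
        · simp only [if_neg h1, if_pos h12, if_neg h5, ih,
            if_pos (And.intro h1 (by omega : (PySem.Int.ofStr? kv.2).getD 0 ≤ 5)),
            if_pos (And.intro h1 h12), Prod.mk.injEq]
          constructor <;> ring
      · have hn5 : ¬ (kv.1 ≠ sample ∧ (PySem.Int.ofStr? kv.2).getD 0 ≤ 5) := by
          rintro ⟨-, h⟩; omega
        have hn12 : ¬ (kv.1 ≠ sample ∧ (PySem.Int.ofStr? kv.2).getD 0 ≤ 12) := by
          rintro ⟨-, h⟩; omega
        rw [if_neg h1, if_neg h12, ih, if_neg hn5, if_neg hn12]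
        simp

-- ===== VERDICT (by name: the statement is the Claim_ definition above) =====
theorem NumberRelated_spec : Claim_equal_NumberRelated := by
  intro sample dists _ _
  unfold Spec_NumberRelated NumberRelated NumberRelated_alt
  simp [NumberRelated_loop]
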